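-- pv_equiv track=rewrite | github.com/cjdool/progswtest | level3/expressasN.py | solution
-- ===== SOURCE A (Python) =====
-- def solution(N, number):
--     dp = []
--     for i in range(1, 9):
--         case_set = {int(str(N)*i)}
--         for j in range(0, i-1):
--             for x in dp[j]:
--                 for y in dp[-j-1]:
--                     case_set.add(x+y)
--                     case_set.add(x-y)
--                     case_set.add(x*y)
--                     if y != 0:
--                         case_set.add(x//y)
--
--         if number in case_set:
--             return i
--
--         dp.append(case_set)
--
--     return -1
-- ===== SOURCE B (Python) =====
-- def solution(N, number):
--     cache = {}
--
--     def reach(k):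
--         # values expressible with exactly k copies of N
--         if k not in cache:
--             vals = {int(str(N) * k)}
--             for s in range(1, k):
--                 left, right = reach(s), reach(k - s)
--                 for x in left:
--                     for y in right:
--                         vals.add(x + y)
--                         vals.add(x - y)
--                         vals.add(x * y)
--                         if y != 0:
--                             vals.add(x // y)
--             cache[k] = vals
--         return cache[k]
--
--     for i in range(1, 9):
--         if number in reach(i):
--             return i
--     return -1
-- ===== Notes on version B (the rewrite author's own statement) =====
-- stated objective: alternative
-- what changed: Replaces A's bottom-up dp list with negative indexing (dp[j], dp[-j-1]) by a memoized recursive helper reach(k) returning the set of values expressible with exactly k copies of N, split over s in 1..k-1; the driver just asks for the first i in 1..8 with number in reach(i).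
import Mathlib
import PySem

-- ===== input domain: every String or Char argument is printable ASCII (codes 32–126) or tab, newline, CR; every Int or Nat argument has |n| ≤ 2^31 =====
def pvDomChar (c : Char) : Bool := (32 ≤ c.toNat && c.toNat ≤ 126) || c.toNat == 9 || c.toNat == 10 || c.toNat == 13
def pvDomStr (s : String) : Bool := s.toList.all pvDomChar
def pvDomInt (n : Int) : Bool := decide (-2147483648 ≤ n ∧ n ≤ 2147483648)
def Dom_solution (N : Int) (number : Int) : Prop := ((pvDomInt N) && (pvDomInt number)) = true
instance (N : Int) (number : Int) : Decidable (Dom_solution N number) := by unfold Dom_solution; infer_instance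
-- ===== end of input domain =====

-- B replaces A's bottom-up dp list (with negative indexing) by a recursive reach(k)
-- ("values expressible with exactly k copies of N", memoized in Python); objective: alternative decomposition, same cost.

-- int(str(N)*k), shared by both Pythons; returns 0 where Python raises ValueError
-- (N < 0 with k ≥ 2: "‑2‑2" is not an int literal) — those inputs are excluded by Pre_solution
def pvConcat (N : Int) (k : Nat) : Int :=
  (PySem.Int.ofChars? (List.flatten (List.replicate k (PySem.Int.toChars N)))).getD 0

-- Python's set is modelled by Std.HashSet: it is consumed only order-independently here
-- (membership tests and building further sets), and PySem.Set's list model is far too slow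
-- for the ~20000-element level-8 sets this program builds.
def pvSingleton (v : Int) : Std.HashSet Int := (Std.HashSet.emptyWithCapacity).insert v

-- ===== PORT A =====
-- case_set of A's iteration i, given the dp list built so far (dp[j] / dp[-j-1] via pyGetD; always in range)
def solutionCase (N : Int) (dp : List (Std.HashSet Int)) (i : Int) : Std.HashSet Int :=
  (PySem.List.pyRange 0 (i-1) 1).foldl
    (fun cs j =>
      (PySem.List.pyGetD dp j Std.HashSet.emptyWithCapacity).toList.foldl
        (fun cs x =>
          (PySem.List.pyGetD dp (-j-1) Std.HashSet.emptyWithCapacity).toList.foldl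
            (fun cs y =>
              let cs := Std.HashSet.insert (Std.HashSet.insert (Std.HashSet.insert cs (x+y)) (x-y)) (x*y)
              if y ≠ 0 then Std.HashSet.insert cs (PySem.Int.floordiv x y) else cs)
            cs)
        cs)
    (pvSingleton (pvConcat N i.toNat))

-- the 'for i in range(1, 9)' loop, threading the dp list
def solutionGo (N number : Int) (dp : List (Std.HashSet Int)) : List Int → Int
  | [] => -1
  | i :: rest =>
    let cs := solutionCase N dp i
    if cs.contains number then i
    else solutionGo N number (dp ++ [cs]) rest

def solution (N : Int) (number : Int) : Int :=
  solutionGo N number [] (PySem.List.pyRange 1 9 1)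

-- ===== PORT B =====
-- B's inner combine helper: fold the four compositions of x ∈ xs, y ∈ ys into vals
def pvCombine (vals : Std.HashSet Int) (xs ys : Std.HashSet Int) : Std.HashSet Int :=
  xs.toList.foldl (fun vals x =>
    ys.toList.foldl (fun vals y =>
      let vals := Std.HashSet.insert (Std.HashSet.insert (Std.HashSet.insert vals (x+y)) (x-y)) (x*y)
      if y ≠ 0 then Std.HashSet.insert vals (PySem.Int.floordiv x y) else vals) vals) vals

-- reach k = values expressible with exactly k copies of N (B's memoized recursion; the
-- Python cache is pure memoization, so the port is the plain well-founded recursion)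
def reach (N : Int) (k : Nat) : Std.HashSet Int :=
  (List.range' 1 (k-1)).attach.foldl
    (fun vals s => pvCombine vals (reach N s.1) (reach N (k - s.1)))
    (pvSingleton (pvConcat N k))
termination_by k
decreasing_by
  · have := List.mem_range'_1.mp s.2; omega
  · have := List.mem_range'_1.mp s.2; omega

-- B's driver: first i in 1..8 with number ∈ reach i, else -1
def solutionAltGo (N number : Int) (i : Nat) : Int :=
  if i ≤ 8 then
    (if (reach N i).contains number then (i : Int) else solutionAltGo N number (i+1))
  else -1
termination_by 9 - i

def solution_alt (N : Int) (number : Int) : Int :=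
  solutionAltGo N number 1

-- ===== PRECONDITION & SPEC =====
-- Pre_ excludes exactly the inputs where Python A raises ValueError: N < 0 and number ≠ N,
-- where int(str(N)*2) is reached and str(N)*2 (e.g. "-2-2") is not an int literal.
def Pre_solution (N : Int) (number : Int) : Prop := 0 ≤ N ∨ number = N
instance (N : Int) (number : Int) : Decidable (Pre_solution N number) := by unfold Pre_solution; infer_instance
def pvWitness_solution : Int × Int := (2, 11)
def Spec_solution (N : Int) (number : Int) (out : Int) : Prop := out = solution_alt N number
instance (N : Int) (number : Int) (out : Int) : Decidable (Spec_solution N number out) := by unfold Spec_solution; infer_instance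

-- ===== CLAIM (what is proved, stated in full; the proofs are below) =====
def Claim_equal_solution : Prop := ∀ (N : Int) (number : Int), Dom_solution N number → Pre_solution N number → Spec_solution N number (solution N number)

-- ===== LEMMAS AND PROOFS =====

-- A's case_set at step i equals B's reach i, when dp holds reach 1 .. reach (i-1)
lemma case_eq_reach (N : Int) (m : Nat) (h1 : 1 ≤ m) :
    solutionCase N ((List.range' 1 (m-1)).map (reach N)) (m : Int) = reach N m := by
  have hdp : ((List.range' 1 (m-1)).map (reach N)).length = m - 1 := by simp
  unfold solutionCase
  have hm1 : (m : Int) - 1 = ((m - 1 : Nat) : Int) := by omega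
  rw [hm1, PySem.List.pyRange_zero_natCast, List.foldl_map]
  conv_rhs => rw [reach]
  rw [List.foldl_attach (f := fun vals s => pvCombine vals (reach N s) (reach N (m - s)))]
  conv_rhs => rw [List.range'_eq_map_range, List.foldl_map]
  have htoNat : ((m : Int)).toNat = m := by omega
  rw [htoNat]
  apply PySem.List.foldl_congr_mem
  intro cs j hj
  have hjm : j < m - 1 := List.mem_range.mp hj
  have hpos : PySem.List.pyGetD ((List.range' 1 (m-1)).map (reach N)) (j : Int) Std.HashSet.emptyWithCapacity = reach N (1 + j) := by
    rw [PySem.List.pyGetD_natCast, List.getD_eq_getElem _ _ (by simp [hjm]), List.getElem_map,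
        List.getElem_range'_1]
  have hneg : PySem.List.pyGetD ((List.range' 1 (m-1)).map (reach N)) (-(j:Int)-1) Std.HashSet.emptyWithCapacity = reach N (m - (1 + j)) := by
    have : (-(j:Int)-1) = -(((j+1 : Nat)) : Int) := by omega
    rw [this, PySem.List.pyGetD_neg_natCast _ _ _ (by omega) (by rw [hdp]; omega)]
    rw [List.getElem_map, List.getElem_range'_1]
    congr 1
    simp only [List.length_map, List.length_range']
    omega
  rw [hpos, hneg]
  rfl

-- the two drivers agree, step t of 1..8 against reach t
lemma loop_eq (N number : Int) :
    ∀ (d t : Nat), 9 ≤ t + d → 1 ≤ t →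
      solutionGo N number ((List.range' 1 (t-1)).map (reach N)) (PySem.List.pyRange (t:Int) 9 1)
        = solutionAltGo N number t := by
  intro d
  induction d with
  | zero =>
    intro t h9 _
    rw [PySem.List.pyRange_one_eq_nil (by exact_mod_cast (by omega : (9:Int) ≤ (t:Int)))]
    rw [solutionAltGo, if_neg (by omega)]
    rfl
  | succ d ih =>
    intro t h9 h1
    by_cases ht : 9 ≤ t
    · rw [PySem.List.pyRange_one_eq_nil (by exact_mod_cast (by omega : (9:Int) ≤ (t:Int)))]
      rw [solutionAltGo, if_neg (by omega)]
      rfl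
    · have ht8 : t ≤ 8 := by omega
      rw [PySem.List.pyRange_one_cons (by exact_mod_cast (by omega : (t:Int) < 9))]
      show (let cs := solutionCase N ((List.range' 1 (t-1)).map (reach N)) (t:Int)
            if cs.contains number then (t:Int)
            else solutionGo N number (((List.range' 1 (t-1)).map (reach N)) ++ [cs])
                   (PySem.List.pyRange ((t:Int)+1) 9 1)) = solutionAltGo N number t
    
      rw [solutionAltGo, if_pos ht8]
      simp only [case_eq_reach N t h1]
      have hlist : ((List.range' 1 (t-1)).map (reach N)) ++ [reach N t]
          = (List.range' 1 ((t+1)-1)).map (reach N) := by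
        have h2 : (t+1) - 1 = (t-1) + 1 := by omega
        have h3 : 1 + (t - 1) = t := by omega
        rw [h2, List.range'_1_concat, List.map_append, h3]
        simp
      have hcast : (t:Int) + 1 = ((t+1 : Nat) : Int) := by omega
      rw [hlist, hcast, ih (t+1) (by omega) (by omega)]

-- ===== VERDICT (by name: the statement is the Claim_ definition above) =====
theorem solution_spec : Claim_equal_solution := by
  intro N number _ _
  unfold Spec_solution solution solution_alt
  have := loop_eq N number 8 1 (by omega) (by omega)
  simpa using this
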